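-- pv_equiv track=rewrite | github.com/danielexcellsmith/Advent-Of-Code | AoC-2024/Day7/Day7.py | format_base
-- ===== SOURCE A (Python) =====
-- def format_base(n, b): # Formats number n to base b
--     if n == 0:
--         return '0'
--     nums = []
--     while n:
--         n, r = divmod(n, b)
--         nums.append(str(r))
--     return ''.join(reversed(nums))
-- ===== SOURCE B (Python) =====
-- def format_base(n, b): # Formats number n to base b
--     if n == 0:
--         return '0'
--     q, r = divmod(n, b)
--     return (format_base(q, b) if q else '') + str(r)
-- ===== Notes on version B (the rewrite author's own statement) =====
-- stated objective: simpler
-- what changed: Replaced the LSB-first digit-accumulating while-loop with its list, reversal and join by a direct most-significant-digit-first recursion that concatenates str(n % b) after the recursive result, needing no list and no reversal.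
import Mathlib
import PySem

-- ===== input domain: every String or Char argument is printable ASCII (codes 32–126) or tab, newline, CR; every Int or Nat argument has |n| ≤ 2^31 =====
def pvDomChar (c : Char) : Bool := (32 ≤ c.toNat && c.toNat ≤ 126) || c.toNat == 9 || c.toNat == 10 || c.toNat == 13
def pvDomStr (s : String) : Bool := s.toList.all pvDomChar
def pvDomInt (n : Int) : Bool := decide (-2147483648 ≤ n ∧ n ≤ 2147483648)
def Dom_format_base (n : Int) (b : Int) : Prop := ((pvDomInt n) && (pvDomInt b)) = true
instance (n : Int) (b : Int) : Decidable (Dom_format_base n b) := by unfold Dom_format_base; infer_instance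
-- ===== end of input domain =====

-- B replaces A's LSB-first digit list + reverse + join by an MSB-first recursion that
-- concatenates digits directly (simpler decomposition, same digit sequence).


-- termination measure for A's while loop
def fbM (n : Int) : Nat := 2 * n.natAbs + (if 0 < n then 1 else 0)

theorem fb_measure_lt (n b : Int) (h1 : n ≠ 0) (h2 : 0 < n ∧ 2 ≤ b ∨ b ≤ -2) :
    fbM (PySem.Int.floordiv n b) < fbM n := by
  have hqr := PySem.Int.floordiv_mul_add_mod n b
  set q := PySem.Int.floordiv n b with hq
  set r := PySem.Int.mod n b with hr
  rcases h2 with ⟨hn, hb⟩ | hb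
  · -- 0 < n, 2 ≤ b : 0 ≤ q and q < n
    have hr1 : 0 ≤ r := PySem.Int.mod_nonneg n (by omega)
    have hr2 : r < b := PySem.Int.mod_lt n (by omega)
    have hq0 : 0 ≤ q := by nlinarith
    have hqn : q < n := by nlinarith
    simp only [fbM]; split_ifs <;> omega
  · have hr1 : b < r := (PySem.Int.mod_neg_bounds n (by omega)).1
    have hr2 : r ≤ 0 := (PySem.Int.mod_neg_bounds n (by omega)).2
    rcases lt_or_gt_of_ne h1 with hn | hn
    · -- n < 0, b ≤ -2 : 0 ≤ q and 2q ≤ -n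
      have hq0 : 0 ≤ q := by nlinarith
      have h2q : 2 * q ≤ -n := by nlinarith
      simp only [fbM]; split_ifs <;> omega
    · -- 0 < n, b ≤ -2 : q < 0 and -2q - 1 ≤ n
      have hq0 : q < 0 := by nlinarith
      have hbound : -2 * q - 1 ≤ n := by nlinarith [mul_nonneg (by omega : (0:Int) ≤ -(b+2)) (by omega : (0:Int) ≤ -(q+1))]
      simp only [fbM]; split_ifs <;> omega

-- ===== PORT A =====
-- the while loop of A; Python's condition is 'while n', i.e. n ≠ 0; the
-- '(0 < n ∧ 2 ≤ b) ∨ b ≤ -2' conjunct is a totality guard only (it holds whenever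
-- Pre_ holds and n ≠ 0; outside it the Python loop never terminates)
def fbLoopA (b : Int) (n : Int) (nums : List String) : List String :=
  if h : n ≠ 0 ∧ (0 < n ∧ 2 ≤ b ∨ b ≤ -2) then
    fbLoopA b (PySem.Int.floordiv n b) (nums ++ [PySem.Int.toStr (PySem.Int.mod n b)])
  else nums
termination_by fbM n
decreasing_by exact fb_measure_lt n b h.1 h.2

def format_base (n : Int) (b : Int) : String :=
  if n = 0 then "0"
  else PySem.Str.join "" ((fbLoopA b n []).reverse)

-- ===== PORT B =====
-- Source B: '0' for n == 0, else (format_base(q, b) if q else '') + str(r) with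
-- q, r = divmod(n, b).  Ported with a fuel parameter (the recursion depth is at
-- most the number of digits; fuel 2*|n|+2 always suffices on Pre_, and the
-- fuel-exhausted branch is never reached there).
def fbRecB : Nat → Int → Int → String
  | 0, _, _ => ""
  | fuel + 1, n, b =>
    match PySem.Int.divmod? n b with
    | none => ""   -- b = 0 : Python raises ZeroDivisionError (outside Pre_)
    | some (q, r) => (if q = 0 then "" else fbRecB fuel q b) ++ PySem.Int.toStr r

def format_base_alt (n : Int) (b : Int) : String :=
  match n with
  | 0 => "0"
  | _ => fbRecB (2 * n.natAbs + 2) n b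

-- ===== PRECONDITION & SPEC =====
-- Pre_ is exactly the set of inputs on which A terminates: outside it A loops forever
-- (n > 0 with b ∈ {-1, 1}, or n < 0 with b ≥ 1, or n ≠ 0 with b = -1) or raises
-- ZeroDivisionError (n ≠ 0, b = 0).
def Pre_format_base (n : Int) (b : Int) : Prop := n = 0 ∨ (0 < n ∧ 2 ≤ b) ∨ b ≤ -2
instance (n : Int) (b : Int) : Decidable (Pre_format_base n b) := by
  unfold Pre_format_base; infer_instance
def pvWitness_format_base : Int × Int := (255, 16)

def Spec_format_base (n : Int) (b : Int) (out : String) : Prop := out = format_base_alt n b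
instance (n : Int) (b : Int) (out : String) : Decidable (Spec_format_base n b out) := by
  unfold Spec_format_base; infer_instance

-- ===== CLAIM (what is proved, stated in full; the proofs are below) =====
def Claim_equal_format_base : Prop :=
  ∀ (n : Int) (b : Int), Dom_format_base n b → Pre_format_base n b →
    Spec_format_base n b (format_base n b)

-- ===== LEMMAS AND PROOFS =====

theorem chars_join_nil_eq_flatten (l : List (List Char)) :
    PySem.Chars.join [] l = l.flatten := by
  induction l with
  | nil => simp [PySem.Chars.join_nil]
  | cons p rest ih =>
    cases rest with
    | nil => simp [PySem.Chars.join_singleton]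
    | cons q rest' =>
      rw [PySem.Chars.join_cons_cons]
      simp [ih]

theorem fbLoopA_stop (n b : Int) (h : ¬ (n ≠ 0 ∧ (0 < n ∧ 2 ≤ b ∨ b ≤ -2))) :
    fbLoopA b n [] = [] := by
  rw [fbLoopA]; simp [h]

-- accumulator lemma for A's loop
theorem fbLoopA_acc (k : Nat) : ∀ (n b : Int) (nums : List String), fbM n ≤ k →
    fbLoopA b n nums = nums ++ fbLoopA b n [] := by
  induction k with
  | zero =>
    intro n b nums hk
    have h : ¬ (n ≠ 0 ∧ (0 < n ∧ 2 ≤ b ∨ b ≤ -2)) := by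
      intro h; simp only [fbM] at hk; have := h.1; omega
    rw [fbLoopA, dif_neg h, fbLoopA_stop n b h]
    simp
  | succ k ih =>
    intro n b nums hk
    by_cases h : n ≠ 0 ∧ (0 < n ∧ 2 ≤ b ∨ b ≤ -2)
    · have hm := fb_measure_lt n b h.1 h.2
      have hk' : fbM (PySem.Int.floordiv n b) ≤ k := by omega
      conv_lhs => rw [fbLoopA]
      conv_rhs => rw [fbLoopA]
      rw [dif_pos h, dif_pos h]
      simp only [List.nil_append]
      rw [ih (PySem.Int.floordiv n b) b _ hk',
        ih (PySem.Int.floordiv n b) b [PySem.Int.toStr (PySem.Int.mod n b)] hk']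
      simp
    · rw [fbLoopA, dif_neg h, fbLoopA_stop n b h]
      simp

-- one unfolding step of B's recursion when b ≠ 0
theorem fbRecB_succ (fuel : Nat) (n b : Int) (hb : b ≠ 0) :
    fbRecB (fuel + 1) n b =
      (if PySem.Int.floordiv n b = 0 then "" else fbRecB fuel (PySem.Int.floordiv n b) b) ++
        PySem.Int.toStr (PySem.Int.mod n b) := by
  have hdm : PySem.Int.divmod? n b = some (PySem.Int.floordiv n b, PySem.Int.mod n b) := by
    simp [PySem.Int.divmod?, hb, PySem.Int.floordiv, PySem.Int.mod]
  rw [fbRecB, hdm]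

-- the core equivalence: A's joined reversed digit list is B's recursion, for n ≠ 0
theorem fb_core (k : Nat) : ∀ (fuel : Nat) (n b : Int), fbM n ≤ k → fbM n ≤ fuel →
    n ≠ 0 → (0 < n ∧ 2 ≤ b ∨ b ≤ -2) →
    PySem.Str.join "" ((fbLoopA b n []).reverse) = fbRecB fuel n b := by
  induction k with
  | zero => intro fuel n b hk _ h1 h2; simp only [fbM] at hk; omega
  | succ k ih =>
    intro fuel n b hk hfuel h1 h2
    have hm := fb_measure_lt n b h1 h2
    have hb0 : b ≠ 0 := by omega
    have hk' : fbM (PySem.Int.floordiv n b) ≤ k := by omega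
    obtain ⟨fuel', rfl⟩ : ∃ f, fuel = f + 1 := by
      cases fuel with
      | zero => exfalso; simp only [fbM] at hfuel; omega
      | succ f => exact ⟨f, rfl⟩
    have hfuel' : fbM (PySem.Int.floordiv n b) ≤ fuel' := by omega
    rw [fbLoopA, dif_pos ⟨h1, h2⟩,
      fbLoopA_acc k (PySem.Int.floordiv n b) b _ hk',
      fbRecB_succ fuel' n b hb0]
    rw [← String.toList_inj]
    by_cases hq : PySem.Int.floordiv n b = 0
    · rw [hq] at *
      rw [fbLoopA_stop 0 b (by simp), if_pos rfl]
      simp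
    · have hc : 0 < PySem.Int.floordiv n b ∧ 2 ≤ b ∨ b ≤ -2 := by
        rcases h2 with ⟨hn, hb⟩ | hb
        · left
          refine ⟨?_, hb⟩
          have h0 : 0 ≤ PySem.Int.floordiv n b :=
            (PySem.Int.le_floordiv_iff_mul_le (by omega)).mpr (by nlinarith)
          omega
        · right; exact hb
      rw [if_neg hq, ← ih fuel' (PySem.Int.floordiv n b) b hk' hfuel' hq hc]
      simp [String.toList_append, chars_join_nil_eq_flatten]

-- ===== VERDICT (by name: the statement is the Claim_ definition above) =====
theorem format_base_spec : Claim_equal_format_base := by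
  intro n b _hDom hPre
  unfold Spec_format_base
  by_cases h0 : n = 0
  · subst h0; rfl
  · rw [format_base, if_neg h0]
    have hc : 0 < n ∧ 2 ≤ b ∨ b ≤ -2 := by
      rcases hPre with h | h | h
      · exact absurd h h0
      · exact Or.inl h
      · exact Or.inr h
    have halt : format_base_alt n b = fbRecB (2 * n.natAbs + 2) n b := by
      unfold format_base_alt
      cases n with
      | ofNat m => cases m with
        | zero => exact absurd rfl h0
        | succ k => rfl
      | negSucc m => rfl
    rw [halt]
    exact fb_core (fbM n) (2 * n.natAbs + 2) n b le_rfl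
      (by simp only [fbM]; split_ifs <;> omega) h0 hc
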